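-- pv_equiv track=rewrite | github.com/JohnCGriffin/merkatilo_py3 | private/utils.py | signalify_vector_copy
-- ===== SOURCE A (Python) =====
-- import numbers
--
-- def signalify_vector_copy (nums):
--     copy = [ None for n in nums ]
--     prev = None
--     for (ndx,n) in enumerate(nums):
--         if isinstance(n,numbers.Number):
--             # SEE THE NOTE ABOVE
--             sig = -1 if n < 0 else 1
--             if sig != prev:
--                 copy[ndx] = sig
--             prev = sig
--     return copy
-- ===== SOURCE B (Python) =====
-- import numbers
--
-- def signalify_vector_copy(nums):
--     # condensed pass: (index, sign) for numeric elements only, then mark run starts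
--     pairs = []
--     for i, n in enumerate(nums):
--         if isinstance(n, numbers.Number):
--             pairs.append((i, -1 if n < 0 else 1))
--     result = [None] * len(nums)
--     prev = None
--     for i, s in pairs:
--         if s != prev:
--             result[i] = s
--         prev = s
--     return result
-- ===== Notes on version B (the rewrite author's own statement) =====
-- stated objective: alternative
-- what changed: B first condenses the input into a list of (index, sign) pairs for the numeric elements, then a separate pass over that condensed list marks the first index of each run of equal signs into a fresh all-None result list, instead of A's single in-place enumerate loop mixing skipping, sign computation and marking.
import Mathlib
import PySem

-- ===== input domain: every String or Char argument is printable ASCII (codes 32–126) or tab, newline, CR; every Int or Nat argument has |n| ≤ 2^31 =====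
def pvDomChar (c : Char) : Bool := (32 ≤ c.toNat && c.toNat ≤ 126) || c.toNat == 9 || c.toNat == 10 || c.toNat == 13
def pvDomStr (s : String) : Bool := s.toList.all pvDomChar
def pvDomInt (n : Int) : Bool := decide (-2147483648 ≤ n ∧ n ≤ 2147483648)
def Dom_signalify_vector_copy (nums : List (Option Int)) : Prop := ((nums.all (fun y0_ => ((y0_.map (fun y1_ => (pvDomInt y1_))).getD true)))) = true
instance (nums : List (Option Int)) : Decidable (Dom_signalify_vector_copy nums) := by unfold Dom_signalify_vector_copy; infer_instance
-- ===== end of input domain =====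

-- B restructures A: condense to (index, sign) pairs, then mark run starts in a second pass (alternative decomposition, same cost).


-- ===== PORT A =====
-- Port of A: single pass over enumerate(nums), updating copy in place and tracking prev sign.
def signalify_vector_copy (nums : List (Option Int)) : List (Option Int) :=
  let copy : List (Option Int) := nums.map (fun _ => none)
  let st := (PySem.List.enumerate nums).foldl
    (fun (st : List (Option Int) × Option Int) p =>
      match p.2 with
      | none => st
      | some n =>
        let sig : Int := if n < 0 then -1 else 1
        let copy' := if some sig ≠ st.2 then st.1.set p.1.toNat (some sig) else st.1
        (copy', some sig))
    (copy, none)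
  st.1

-- ===== PORT B =====
-- Port of B: condense to (index, sign) pairs, then a second pass marks run starts.
def signalify_vector_copy_alt (nums : List (Option Int)) : List (Option Int) :=
  let pairs : List (Int × Int) := (PySem.List.enumerate nums).filterMap
    (fun p => p.2.map (fun n => (p.1, if n < 0 then (-1 : Int) else 1)))
  let st := pairs.foldl
    (fun (st : List (Option Int) × Option Int) q =>
      (if some q.2 ≠ st.2 then st.1.set q.1.toNat (some q.2) else st.1, some q.2))
    (List.replicate nums.length none, none)
  st.1

-- ===== PRECONDITION & SPEC =====
def Spec_signalify_vector_copy (nums : List (Option Int)) (out : List (Option Int)) : Prop := out = signalify_vector_copy_alt nums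
instance (nums : List (Option Int)) (out : List (Option Int)) : Decidable (Spec_signalify_vector_copy nums out) := by unfold Spec_signalify_vector_copy; infer_instance

-- ===== CLAIM (what is proved, stated in full; the proofs are below) =====
def Claim_equal_signalify_vector_copy : Prop := ∀ (nums : List (Option Int)), Dom_signalify_vector_copy nums → Spec_signalify_vector_copy nums (signalify_vector_copy nums)

-- ===== LEMMAS AND PROOFS =====

-- ===== VERDICT (by name: the statement is the Claim_ definition above) =====
-- Core: A's fold over any pair list equals B's fold over its condensation, for any start state.
theorem fold_condense (l : List (Int × Option Int)) (st : List (Option Int) × Option Int) :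
    l.foldl
      (fun (st : List (Option Int) × Option Int) p =>
        match p.2 with
        | none => st
        | some n =>
          let sig : Int := if n < 0 then -1 else 1
          let copy' := if some sig ≠ st.2 then st.1.set p.1.toNat (some sig) else st.1
          (copy', some sig)) st
    = (l.filterMap (fun p => p.2.map (fun n => (p.1, if n < 0 then (-1 : Int) else 1)))).foldl
      (fun (st : List (Option Int) × Option Int) q =>
        (if some q.2 ≠ st.2 then st.1.set q.1.toNat (some q.2) else st.1, some q.2)) st := by
  induction l generalizing st with
  | nil => rfl
  | cons p t ih =>
    cases p with
    | mk i o =>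
      cases o with
      | none => simpa [List.filterMap_cons] using ih st
      | some n => simpa [List.filterMap_cons] using ih _

theorem signalify_vector_copy_spec : Claim_equal_signalify_vector_copy := by
  intro nums _
  simp only [Spec_signalify_vector_copy, signalify_vector_copy, signalify_vector_copy_alt,
    List.map_const', fold_condense]
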